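-- pv_equiv track=rewrite | github.com/bsifflard77/specmap-mcp | src/specmap/tasks.py | _identify_parallel_groups
-- ===== SOURCE A (Python) =====
-- from typing import Dict, List, Optional, Tuple
--
-- def _identify_parallel_groups(tasks: List[Dict]) -> List[List[str]]:
--     """Identify groups of tasks that can run in parallel"""
--     parallel_groups = []
--     current_group = []
--
--     for task in tasks:
--         if task.get('parallel', False):
--             current_group.append(task['id'])
--         else:
--             if current_group:
--                 parallel_groups.append(current_group)
--                 current_group = []
--
--     if current_group:
--         parallel_groups.append(current_group)
--
--     return parallel_groups
-- ===== SOURCE B (Python) =====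
-- def _identify_parallel_groups(tasks):
--     """Identify groups of tasks that can run in parallel"""
--     flags = [bool(t.get('parallel', False)) for t in tasks]
--     n = len(flags)
--     starts = [i for i in range(n) if flags[i] and (i == 0 or not flags[i - 1])]
--     ends = [i for i in range(n) if flags[i] and (i == n - 1 or not flags[i + 1])]
--     return [[t['id'] for t in tasks[s:e + 1]] for s, e in zip(starts, ends)]
-- ===== Notes on version B (the rewrite author's own statement) =====
-- stated objective: alternative
-- what changed: Replaces the single-pass accumulator loop by staged edge detection: a flags array, lists of run-start and run-end indices (rising/falling edges), then slicing the task list between paired boundaries.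
import Mathlib
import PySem

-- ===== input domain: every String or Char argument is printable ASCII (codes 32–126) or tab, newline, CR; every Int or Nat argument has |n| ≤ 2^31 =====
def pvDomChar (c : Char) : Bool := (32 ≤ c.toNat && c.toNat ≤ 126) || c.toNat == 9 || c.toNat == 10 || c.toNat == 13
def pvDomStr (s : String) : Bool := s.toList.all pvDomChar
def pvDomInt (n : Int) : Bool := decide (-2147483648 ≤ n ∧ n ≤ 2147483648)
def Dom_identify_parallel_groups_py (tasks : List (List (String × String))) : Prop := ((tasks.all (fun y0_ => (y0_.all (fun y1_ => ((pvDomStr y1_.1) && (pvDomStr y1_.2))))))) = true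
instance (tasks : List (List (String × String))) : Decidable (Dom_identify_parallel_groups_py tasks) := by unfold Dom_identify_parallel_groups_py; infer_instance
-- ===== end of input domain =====

-- B replaces the accumulator loop by staged edge detection (flags, run-start/run-end indices, slices); not faster.

-- shared helpers: task.get('parallel', False) truthiness (values are strings: truthy = non-empty)
def pvKey (t : List (String × String)) : Bool :=
  match (PySem.Dict.mk t).get? "parallel" with
  | some v => !(v == "")
  | none => false

-- task['id']; Pre_ guarantees the key is present wherever it is read (Python raises KeyError otherwise)
def pvId (t : List (String × String)) : String :=
  ((PySem.Dict.mk t).get? "id").getD ""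

-- ===== PORT A =====
def identify_parallel_groups_py (tasks : List (List (String × String))) : List (List String) :=
  let st := tasks.foldl
    (fun (st : List (List String) × List String) task =>
      if pvKey task then (st.1, st.2 ++ [pvId task])
      else if st.2.isEmpty then st else (st.1 ++ [st.2], []))
    ([], [])
  if st.2.isEmpty then st.1 else st.1 ++ [st.2]

-- ===== PORT B =====
-- staged passes: flags array, rising-edge indices (starts), falling-edge indices (ends),
-- then a slice tasks[s:e+1] per paired boundary. flags[i-1]/flags[i+1] are only read
-- when the guard puts them in range, so getD is exact there.
def identify_parallel_groups_py_alt (tasks : List (List (String × String))) : List (List String) :=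
  let flags := tasks.map pvKey
  let n := flags.length
  let starts := (List.range n).filter
    (fun i => flags.getD i false && ((i == 0) || !(flags.getD (i - 1) false)))
  let ends := (List.range n).filter
    (fun i => flags.getD i false && ((i == n - 1) || !(flags.getD (i + 1) false)))
  (starts.zip ends).map (fun se =>
    (PySem.List.slice tasks (some ((se.1 : Nat) : Int)) (some ((se.2 + 1 : Nat) : Int))).map pvId)

-- ===== PRECONDITION & SPEC =====
-- Pre_ excludes exactly the inputs where A raises KeyError: a task whose 'parallel' value is
-- truthy (non-empty) but which has no 'id' key. (B raises the same KeyError there.)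
def Pre_identify_parallel_groups_py (tasks : List (List (String × String))) : Prop :=
  (tasks.all (fun t => !(pvKey t) || ((PySem.Dict.mk t).get? "id").isSome)) = true
instance (tasks : List (List (String × String))) : Decidable (Pre_identify_parallel_groups_py tasks) := by unfold Pre_identify_parallel_groups_py; infer_instance

def pvWitness_identify_parallel_groups_py : (List (List (String × String))) :=
  [[("id", "a"), ("parallel", "x")], [("id", "b")], [("parallel", "y"), ("id", "c")]]

def Spec_identify_parallel_groups_py (tasks : List (List (String × String))) (out : List (List String)) : Prop := out = identify_parallel_groups_py_alt tasks
instance (tasks : List (List (String × String))) (out : List (List String)) : Decidable (Spec_identify_parallel_groups_py tasks out) := by unfold Spec_identify_parallel_groups_py; infer_instance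

-- ===== CLAIM (what is proved, stated in full; the proofs are below) =====
def Claim_equal_identify_parallel_groups_py : Prop := ∀ (tasks : List (List (String × String))), Dom_identify_parallel_groups_py tasks → Pre_identify_parallel_groups_py tasks → Spec_identify_parallel_groups_py tasks (identify_parallel_groups_py tasks)

-- ===== LEMMAS AND PROOFS =====

-- common recursive specification of the grouping
def pvSpec : List (List (String × String)) → List String → List (List String)
  | [], cur => if cur.isEmpty then [] else [cur]
  | t :: ts, cur =>
    if pvKey t then pvSpec ts (cur ++ [pvId t])
    else (if cur.isEmpty then [] else [cur]) ++ pvSpec ts []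

-- A's fold with an arbitrary accumulator computes pvSpec

-- A's fold with an arbitrary accumulator computes pvSpec
theorem pvA_spec (ts : List (List (String × String))) :
    ∀ (gs : List (List String)) (cur : List String),
      (let st := ts.foldl
        (fun (st : List (List String) × List String) task =>
          if pvKey task then (st.1, st.2 ++ [pvId task])
          else if st.2.isEmpty then st else (st.1 ++ [st.2], []))
        (gs, cur)
       ; if st.2.isEmpty then st.1 else st.1 ++ [st.2]) = gs ++ pvSpec ts cur := by
  induction ts with
  | nil =>
    intro gs cur
    simp only [List.foldl_nil, pvSpec]
    by_cases h : cur.isEmpty <;> simp [h]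
  | cons t ts ih =>
    intro gs cur
    simp only [List.foldl_cons, pvSpec]
    by_cases hk : pvKey t
    · simp only [hk, if_true]
      exact ih gs (cur ++ [pvId t])
    · simp only [hk, if_false, Bool.false_eq_true]
      by_cases hc : cur.isEmpty
      · have hcur : cur = [] := List.isEmpty_iff.mp hc
        simp only [hcur]
        simpa using ih gs []
      · simp only [hc, Bool.false_eq_true, if_false]
        rw [ih (gs ++ [cur]) []]
        simp

theorem pvA_eq_spec (ts : List (List (String × String))) :
    identify_parallel_groups_py ts = pvSpec ts [] := by
  have := pvA_spec ts [] []
  simpa [identify_parallel_groups_py] using this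

-- pvSpec consumes a run of truthy tasks by appending their ids to the accumulator

-- pvSpec consumes a run of truthy tasks by appending their ids to the accumulator
theorem pvSpec_true_run (run : List (List (String × String))) :
    ∀ (rest : List (List (String × String))) (cur : List String),
      (∀ u ∈ run, pvKey u = true) →
      pvSpec (run ++ rest) cur = pvSpec rest (cur ++ run.map pvId) := by
  induction run with
  | nil => intro rest cur _; simp
  | cons u us ih =>
    intro rest cur h
    have hu : pvKey u = true := h u (by simp)
    simp only [List.cons_append, pvSpec, hu, if_true, List.map_cons]
    rw [ih rest (cur ++ [pvId u]) (fun v hv => h v (by simp [hv]))]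
    simp

-- flushing a non-empty accumulator when the next task (if any) is falsy

-- flushing a non-empty accumulator when the next task (if any) is falsy
theorem pvSpec_flush (rest : List (List (String × String))) (cur : List String)
    (hc : cur ≠ [])
    (hhead : ∀ r rs, rest = r :: rs → pvKey r = false) :
    pvSpec rest cur = cur :: pvSpec rest [] := by
  cases rest with
  | nil => simp [pvSpec, hc]
  | cons r rs =>
    have hr : pvKey r = false := hhead r rs rfl
    simp [pvSpec, hr, hc]

-- recursive characterisations of B's two edge-index lists

-- recursive characterisations of B's two edge-index lists
def pvStartsR (prev : Bool) : List Bool → List Nat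
  | [] => []
  | f :: fs => (if f && !prev then [0] else []) ++ (pvStartsR f fs).map (· + 1)

def pvEndsR : List Bool → List Nat
  | [] => []
  | f :: fs => (if f && !(fs.getD 0 false) then [0] else []) ++ (pvEndsR fs).map (· + 1)

-- the filter over range computes pvStartsR (generalised over the flag before the window)
theorem pvStarts_filter (fs : List Bool) : ∀ (prev : Bool),
    (List.range fs.length).filter
      (fun i => fs.getD i false && (if i = 0 then !prev else !(fs.getD (i - 1) false)))
      = pvStartsR prev fs := by
  induction fs with
  | nil => intro prev; simp [pvStartsR]
  | cons f fs ih =>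
    intro prev
    rw [List.length_cons, List.range_succ_eq_map, List.filter_cons, List.filter_map]
    have hp : ((fun i => (f :: fs).getD i false &&
        (if i = 0 then !prev else !((f :: fs).getD (i - 1) false))) ∘ Nat.succ)
        = (fun i => fs.getD i false && (if i = 0 then !f else !(fs.getD (i - 1) false))) := by
      funext i
      cases i with
      | zero => simp
      | succ j => simp
    rw [hp, ih f]
    simp only [pvStartsR, List.getD_cons_zero]
    split_ifs <;> simp_all

theorem pvEnds_filter (fs : List Bool) :
    (List.range fs.length).filter
      (fun i => fs.getD i false && !(fs.getD (i + 1) false))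
      = pvEndsR fs := by
  induction fs with
  | nil => simp [pvEndsR]
  | cons f fs ih =>
    rw [List.length_cons, List.range_succ_eq_map, List.filter_cons, List.filter_map]
    have hp : ((fun i => (f :: fs).getD i false && !((f :: fs).getD (i + 1) false)) ∘ Nat.succ)
        = (fun i => fs.getD i false && !(fs.getD (i + 1) false)) := by
      funext i; simp
    rw [hp, ih]
    simp only [pvEndsR, List.getD_cons_zero, List.getD_cons_succ]
    split_ifs <;> simp_all

-- B's port, rewritten through the recursive edge lists and drop/take slices
theorem pvB_eq (tasks : List (List (String × String))) :
    identify_parallel_groups_py_alt tasks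
      = ((pvStartsR false (tasks.map pvKey)).zip (pvEndsR (tasks.map pvKey))).map
          (fun se => ((tasks.drop se.1).take (se.2 + 1 - se.1)).map pvId) := by
  unfold identify_parallel_groups_py_alt
  simp only []
  set fs := tasks.map pvKey with hfs
  have hstarts : (List.range fs.length).filter
      (fun i => fs.getD i false && ((i == 0) || !(fs.getD (i - 1) false))) = pvStartsR false fs := by
    rw [← pvStarts_filter fs false]
    apply List.filter_congr
    intro i _
    cases i <;> simp
  have hends : (List.range fs.length).filter
      (fun i => fs.getD i false && ((i == fs.length - 1) || !(fs.getD (i + 1) false))) = pvEndsR fs := by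
    rw [← pvEnds_filter fs]
    apply List.filter_congr
    intro i hi
    have hi' : i < fs.length := List.mem_range.mp hi
    by_cases h : i = fs.length - 1
    · have h1 : fs.getD (i + 1) false = false := List.getD_eq_default _ _ (by omega)
      simp only [List.getD_eq_getElem?_getD] at h1
      subst h
      simp [h1]
    · have hne : (i == fs.length - 1) = false := by simp [h]
      simp [hne]
  rw [hstarts, hends]
  apply List.map_congr_left
  intro se _
  rw [PySem.List.slice_natCast]

-- run lemmas for the edge lists
theorem pvStartsR_prev_irrel (rest : List Bool) (h : rest.getD 0 false = false) :
    pvStartsR true rest = pvStartsR false rest := by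
  cases rest with
  | nil => rfl
  | cons r rs =>
    have : r = false := by simpa using h
    subst this
    simp [pvStartsR]

theorem pvStartsR_true_run (L : Nat) (rest : List Bool) :
    pvStartsR true (List.replicate L true ++ rest) = (pvStartsR true rest).map (· + L) := by
  induction L with
  | zero => simp
  | succ n ih =>
    rw [List.replicate_succ, List.cons_append]
    simp [pvStartsR, ih, List.map_map]

theorem pvEndsR_true_run (L : Nat) (rest : List Bool) (h : rest.getD 0 false = false) :
    pvEndsR (List.replicate (L + 1) true ++ rest) = L :: (pvEndsR rest).map (· + (L + 1)) := by
  induction L with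
  | zero =>
    simp only [List.replicate_succ, List.replicate_zero, List.nil_append, List.cons_append,
      pvEndsR, h]
    simp
  | succ n ih =>
    rw [List.replicate_succ, List.cons_append]
    have hhead : ((List.replicate (n + 1) true ++ rest).getD 0 false) = true := by
      simp [List.replicate_succ]
    simp only [pvEndsR, hhead, ih]
    simp

-- a truthy run contributes exactly one start (index 0) and one end (its last index)
theorem pvStartsR_start (m : Nat) (fr : List Bool) (h : fr.getD 0 false = false) :
    pvStartsR false (List.replicate (m + 1) true ++ fr)
      = 0 :: (pvStartsR false fr).map (· + (m + 1)) := by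
  rw [List.replicate_succ, List.cons_append]
  simp [pvStartsR, pvStartsR_true_run, pvStartsR_prev_irrel fr h, List.map_map]

-- B computes pvSpec too (strong induction on length, splitting off the leading run)
theorem pvB_eq_spec : ∀ (n : Nat) (ts : List (List (String × String))), ts.length ≤ n →
    identify_parallel_groups_py_alt ts = pvSpec ts [] := by
  intro n
  induction n with
  | zero =>
    intro ts h
    have : ts = [] := List.eq_nil_of_length_eq_zero (Nat.le_zero.mp h)
    subst this
    rw [pvB_eq]
    simp [pvStartsR, pvEndsR, pvSpec]
  | succ n ih =>
    intro ts h
    cases ts with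
    | nil => rw [pvB_eq]; simp [pvStartsR, pvEndsR, pvSpec]
    | cons t ts =>
      rw [pvB_eq]
      by_cases hk : pvKey t
      · -- truthy head: slice out the run
        set run : List (List (String × String)) := t :: ts.takeWhile pvKey with hrun
        set rest : List (List (String × String)) := ts.dropWhile pvKey with hrest
        have hconc : t :: ts = run ++ rest := by
          simp [hrun, hrest, List.takeWhile_append_dropWhile]
        have hrunall : ∀ u ∈ run, pvKey u = true := by
          intro u hu
          rcases List.mem_cons.mp hu with h1 | h1
          · rw [h1]; exact hk
          · exact List.mem_takeWhile_imp h1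
        have hrest0 : ((rest.map pvKey).getD 0 false) = false := by
          cases hr : rest with
          | nil => simp
          | cons r rs =>
            have h2 : pvKey r = false := by
              have := List.head?_dropWhile_not pvKey ts
              rw [← hrest, hr] at this
              simpa using this
            simp [h2]
        obtain ⟨m, hm⟩ : ∃ m, run.length = m + 1 := ⟨(ts.takeWhile pvKey).length, by simp [hrun]⟩
        have hflags : (t :: ts).map pvKey
            = List.replicate (m + 1) true ++ rest.map pvKey := by
          rw [hconc, List.map_append]
          congr 1
          exact List.eq_replicate_iff.mpr ⟨by simp [hm], fun b hb => by
            rcases List.mem_map.mp hb with ⟨u, hu, rfl⟩; exact hrunall u hu⟩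
        rw [hflags, pvStartsR_start m _ hrest0, pvEndsR_true_run m _ hrest0]
        rw [List.zip_cons_cons, List.zip_map, List.map_cons, List.map_map]
        -- first group is the run itself
        have hfirst : (((t :: ts).drop 0).take (m + 1 - 0)).map pvId = run.map pvId := by
          rw [hconc, List.drop_zero]
          simp only [Nat.sub_zero, ← hm]
          rw [List.take_left]
        rw [hfirst]
        -- remaining groups are B on rest, shifted
        have htail : ((fun se => List.map pvId (List.take (se.2 + 1 - se.1) (List.drop se.1 (t :: ts))))
              ∘ Prod.map (fun x => x + (m + 1)) (fun x => x + (m + 1)))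
            = (fun se : Nat × Nat => ((rest.drop se.1).take (se.2 + 1 - se.1)).map pvId) := by
          funext se
          simp only [Function.comp_apply, Prod.map_fst, Prod.map_snd]
          rw [hconc]
          have hd : (run ++ rest).drop (se.1 + (m + 1)) = rest.drop se.1 := by
            rw [show se.1 + (m + 1) = run.length + se.1 by omega]
            exact List.drop_length_add_append se.1
          rw [hd, show se.2 + (m + 1) + 1 - (se.1 + (m + 1)) = se.2 + 1 - se.1 from by omega]
        rw [htail, ← pvB_eq rest]
        have hlen : rest.length ≤ n := by
          have h2 := List.length_dropWhile_le pvKey ts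
          rw [← hrest] at h2
          simp only [List.length_cons] at h
          omega
        rw [ih rest hlen]
        -- pvSpec side
        have hspec : pvSpec (t :: ts) [] = run.map pvId :: pvSpec rest [] := by
          conv_lhs => rw [hconc]
          rw [pvSpec_true_run run rest [] hrunall, List.nil_append]
          exact pvSpec_flush rest (run.map pvId) (by rw [hrun]; simp)
            (fun r rs hr => by
              have := List.head?_dropWhile_not pvKey ts
              rw [← hrest, hr] at this
              simpa using this)
        rw [hspec]
      · -- falsy head: everything shifts by one
        have hkf : pvKey t = false := Bool.eq_false_iff.mpr hk
        have hmap : (t :: ts).map pvKey = false :: ts.map pvKey := by simp [hkf]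
        rw [hmap]
        have hs : pvStartsR false (false :: ts.map pvKey)
            = (pvStartsR false (ts.map pvKey)).map (· + 1) := by simp [pvStartsR]
        have he : pvEndsR (false :: ts.map pvKey)
            = (pvEndsR (ts.map pvKey)).map (· + 1) := by simp [pvEndsR]
        rw [hs, he, List.zip_map, List.map_map]
        have htail : ((fun se => List.map pvId (List.take (se.2 + 1 - se.1) (List.drop se.1 (t :: ts))))
              ∘ Prod.map (fun x => x + 1) (fun x => x + 1))
            = (fun se : Nat × Nat => ((ts.drop se.1).take (se.2 + 1 - se.1)).map pvId) := by
          funext se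
          simp only [Function.comp_apply, Prod.map_fst, Prod.map_snd, List.drop_succ_cons]
          rw [show se.2 + 1 + 1 - (se.1 + 1) = se.2 + 1 - se.1 from by omega]
        rw [htail, ← pvB_eq ts]
        rw [ih ts (by simp only [List.length_cons] at h; omega)]
        simp [pvSpec, hkf]

-- ===== VERDICT (by name: the statement is the Claim_ definition above) =====
theorem identify_parallel_groups_py_spec : Claim_equal_identify_parallel_groups_py := by
  intro tasks _ _
  unfold Spec_identify_parallel_groups_py
  rw [pvA_eq_spec, pvB_eq_spec tasks.length tasks (le_refl _)]
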